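-- pv_equiv track=rewrite | github.com/Xingyu-Xiao/Memo-of-Introduction-to-Computer-Science- | 题目总要/codeforce/IQ test.py | f
-- ===== SOURCE A (Python) =====
-- def f(b):
--     even = 0
--     for m in b:
--         if m % 2 == 0:
--             even += 1
--     if even == 1:
--         for m in b:
--             if m % 2 == 0:
--                 s = b.index(m)+1
--     else:
--         for m in b:
--             if m % 2 != 0:
--                 s = b.index(m)+1
--     return s
-- ===== SOURCE B (Python) =====
-- def f(b):
--     even = 0
--     first = {}
--     for i, m in enumerate(b):
--         if m not in first:
--             first[m] = i
--         if m % 2 == 0: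
--             even += 1
--             t_even = m
--         else:
--             t_odd = m
--     return first[t_even if even == 1 else t_odd] + 1
-- ===== Notes on version B (the rewrite author's own statement) =====
-- stated objective: faster
-- what changed: B replaces A's count-then-rescan-with-inner-b.index structure by a single enumerate pass that maintains the even count, a first-occurrence-index dict and the last-seen value of each parity, so the repeated O(n) b.index scans disappear.
import Mathlib
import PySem

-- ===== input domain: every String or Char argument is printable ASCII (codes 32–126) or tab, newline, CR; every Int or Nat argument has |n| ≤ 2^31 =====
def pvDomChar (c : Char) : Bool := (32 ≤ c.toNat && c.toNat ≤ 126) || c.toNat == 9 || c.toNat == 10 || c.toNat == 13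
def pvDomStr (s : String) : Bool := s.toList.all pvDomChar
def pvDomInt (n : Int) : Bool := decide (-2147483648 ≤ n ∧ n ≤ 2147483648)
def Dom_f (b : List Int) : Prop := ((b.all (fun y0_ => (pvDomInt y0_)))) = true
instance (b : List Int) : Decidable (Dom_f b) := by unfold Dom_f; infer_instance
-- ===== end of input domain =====

-- B: one enumerate pass with an even counter, a first-occurrence-index dict and last-seen parity values,
-- instead of A's count loop plus a rescan that calls b.index inside the loop.

-- ===== PORT A =====
def f (b : List Int) : Int :=
  let even := b.foldl (fun e m => if PySem.Int.mod m 2 = 0 then e + 1 else e) (0 : Int)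
  let s : Option Int :=
    if even = 1 then
      b.foldl (fun s m => if PySem.Int.mod m 2 = 0
        then some ((((PySem.List.index? b m).getD 0 : Nat) : Int) + 1) else s) none
    else
      b.foldl (fun s m => if PySem.Int.mod m 2 ≠ 0
        then some ((((PySem.List.index? b m).getD 0 : Nat) : Int) + 1) else s) none
  s.getD 0   -- s is always set under Pre_f; Python raises UnboundLocalError outside it

-- ===== PORT B =====
def stepB (st : Int × PySem.Dict Int Int × Option Int × Option Int) (p : Int × Int) :
    Int × PySem.Dict Int Int × Option Int × Option Int :=
  let first := if st.2.1.contains p.2 then st.2.1 else st.2.1.insert p.2 p.1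
  if PySem.Int.mod p.2 2 = 0 then (st.1 + 1, first, some p.2, st.2.2.2)
  else (st.1, first, st.2.2.1, some p.2)

def f_alt (b : List Int) : Int :=
  let st := (PySem.List.enumerate b 0).foldl stepB (0, PySem.Dict.empty, none, none)
  match (if st.1 = 1 then st.2.2.1 else st.2.2.2) with
  | some v => st.2.1.getD v 0 + 1
  | none => 0   -- unreachable under Pre_f (Python raises UnboundLocalError there)

-- ===== PRECONDITION & SPEC =====
-- Pre_f excludes exactly the inputs where A raises UnboundLocalError: lists whose number of even
-- elements is ≠ 1 and which contain no odd element (e.g. [] or [2, 4]).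
def Pre_f (b : List Int) : Prop :=
  b.countP (fun m => PySem.Int.mod m 2 == 0) = 1 ∨ ∃ m ∈ b, PySem.Int.mod m 2 ≠ 0
instance (b : List Int) : Decidable (Pre_f b) := by unfold Pre_f; infer_instance
def pvWitness_f : List Int := [2, 3]

def Spec_f (b : List Int) (out : Int) : Prop := out = f_alt b
instance (b : List Int) (out : Int) : Decidable (Spec_f b out) := by unfold Spec_f; infer_instance

-- ===== CLAIM (what is proved, stated in full; the proofs are below) =====
def Claim_equal_f : Prop := ∀ (b : List Int), Dom_f b → Pre_f b → Spec_f b (f b)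

-- ===== LEMMAS AND PROOFS =====

-- A's count loop is countP
theorem countA (b : List Int) : ∀ e : Int,
    b.foldl (fun e m => if PySem.Int.mod m 2 = 0 then e + 1 else e) e
      = e + b.countP (fun m => PySem.Int.mod m 2 == 0) := by
  induction b with
  | nil => simp
  | cons m t ih =>
      intro e
      simp only [List.foldl_cons, List.countP_cons]
      by_cases h : PySem.Int.mod m 2 = 0
      · rw [if_pos h, ih]
        have hb : (PySem.Int.mod m 2 == 0) = true := by simpa using h
        rw [hb]; simp; omega
      · rw [if_neg h, ih]
        have hb : (PySem.Int.mod m 2 == 0) = false := by simpa using h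
        rw [hb]; simp

-- last-match fold that stores g m equals map g of the last-match fold storing m
theorem lastMap (p : Int → Prop) [DecidablePred p] (g : Int → Int) (b : List Int) :
    ∀ t : Option Int,
      b.foldl (fun s m => if p m then some (g m) else s) (t.map g)
        = (b.foldl (fun s m => if p m then some m else s) t).map g := by
  induction b with
  | nil => intro t; rfl
  | cons m rest ih =>
      intro t
      by_cases h : p m
      · simpa [h] using ih (some m)
      · simp [h, ih t]

-- a last-match fold over matchless elements keeps its accumulator
theorem lastStay (p : Int → Prop) [DecidablePred p] :
    ∀ (l : List Int) (t : Option Int), (∀ x ∈ l, ¬ p x) →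
      l.foldl (fun s m => if p m then some m else s) t = t := by
  intro l
  induction l with
  | nil => intro t _; rfl
  | cons y ys ihy =>
      intro t hno
      simp only [List.foldl_cons]
      rw [if_neg (hno y List.mem_cons_self)]
      exact ihy t (fun x hx => hno x (List.mem_cons_of_mem _ hx))

-- a last-match fold over a list containing a match returns some v with v ∈ b and p v
theorem lastSpec (p : Int → Prop) [DecidablePred p] (b : List Int) :
    ∀ t : Option Int, (∃ m ∈ b, p m) →
      ∃ v, b.foldl (fun s m => if p m then some m else s) t = some v ∧ v ∈ b ∧ p v := by
  induction b with
  | nil => rintro t ⟨m, hm, _⟩; cases hm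
  | cons m rest ih =>
      intro t hex
      by_cases hrest : ∃ x ∈ rest, p x
      · obtain ⟨v, hv, hmem, hp⟩ := ih _ hrest
        exact ⟨v, hv, List.mem_cons_of_mem _ hmem, hp⟩
      · have hpm : p m := by
          obtain ⟨x, hx, hpx⟩ := hex
          rcases List.mem_cons.mp hx with rfl | hx
          · exact hpx
          · exact absurd ⟨x, hx, hpx⟩ hrest
        refine ⟨m, ?_, List.mem_cons_self, hpm⟩
        simp only [List.foldl_cons, if_pos hpm]
        exact lastStay p rest (some m) (fun x hx hpx => hrest ⟨x, hx, hpx⟩)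

-- projections of B's fold ---------------------------------------------------
theorem projB_even (b : List Int) : ∀ (i e : Int) (d : PySem.Dict Int Int) (te tod : Option Int),
    ((PySem.List.enumerate b i).foldl stepB (e, d, te, tod)).1
      = e + b.countP (fun m => PySem.Int.mod m 2 == 0) := by
  induction b with
  | nil => simp [PySem.List.enumerate_nil]
  | cons m t ih =>
      intro i e d te tod
      rw [PySem.List.enumerate_cons]
      simp only [List.foldl_cons, stepB]
      rw [List.countP_cons]
      by_cases h : PySem.Int.mod m 2 = 0
      · have hb : (PySem.Int.mod m 2 == 0) = true := by simpa using h
        simp only [if_pos h, ih, hb]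
        simp; omega
      · have hb : (PySem.Int.mod m 2 == 0) = false := by simpa using h
        simp only [if_neg h, ih, hb]
        simp

theorem projB_te (b : List Int) : ∀ (i e : Int) (d : PySem.Dict Int Int) (te tod : Option Int),
    ((PySem.List.enumerate b i).foldl stepB (e, d, te, tod)).2.2.1
      = b.foldl (fun s m => if PySem.Int.mod m 2 = 0 then some m else s) te := by
  induction b with
  | nil => simp [PySem.List.enumerate_nil]
  | cons m t ih =>
      intro i e d te tod
      rw [PySem.List.enumerate_cons]
      simp only [List.foldl_cons, stepB]
      by_cases h : PySem.Int.mod m 2 = 0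
      · rw [if_pos h, ih, if_pos h]
      · rw [if_neg h, ih, if_neg h]

theorem projB_to (b : List Int) : ∀ (i e : Int) (d : PySem.Dict Int Int) (te tod : Option Int),
    ((PySem.List.enumerate b i).foldl stepB (e, d, te, tod)).2.2.2
      = b.foldl (fun s m => if PySem.Int.mod m 2 ≠ 0 then some m else s) tod := by
  induction b with
  | nil => simp [PySem.List.enumerate_nil]
  | cons m t ih =>
      intro i e d te tod
      rw [PySem.List.enumerate_cons]
      simp only [List.foldl_cons, stepB]
      by_cases h : PySem.Int.mod m 2 = 0
      · rw [if_pos h, ih, if_neg (fun hn => hn h)]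
      · rw [if_neg h, ih, if_pos h]

-- once a key is in the dict, no later step of B's loop changes its binding
theorem dictKeep (v i : Int) :
    ∀ (l : List (Int × Int)) (st : Int × PySem.Dict Int Int × Option Int × Option Int),
      st.2.1.get? v = some i → (l.foldl stepB st).2.1.get? v = some i := by
  intro l
  induction l with
  | nil => intro st h; exact h
  | cons p ps ihl =>
      intro st h
      rw [List.foldl_cons]
      apply ihl
      have hget : (if st.2.1.contains p.2 then st.2.1 else st.2.1.insert p.2 p.1).get? v
          = some i := by
        by_cases hpm : st.2.1.contains p.2 = true
        · rw [if_pos hpm]; exact h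
        · have hvp : v ≠ p.2 := by
            intro hvp; subst hvp
            rw [PySem.Dict.contains_eq_isSome_get?, h] at hpm; simp at hpm
          rw [if_neg hpm, PySem.Dict.get?_insert_of_ne _ _ hvp]; exact h
      simp only [stepB]
      by_cases hpar : PySem.Int.mod p.2 2 = 0
      · rw [if_pos hpar]; exact hget
      · rw [if_neg hpar]; exact hget

-- the dict component holds the first-occurrence index (offset by the start index i)
theorem projB_first (b : List Int) : ∀ (i e : Int) (d : PySem.Dict Int Int) (te tod : Option Int)
    (v : Int), v ∈ b → d.contains v = false →
    ((PySem.List.enumerate b i).foldl stepB (e, d, te, tod)).2.1.getD v 0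
      = i + (((PySem.List.index? b v).getD 0 : Nat) : Int) := by
  induction b with
  | nil => intro _ _ _ _ _ _ hv; cases hv
  | cons m t ih =>
      intro i e d te tod v hv hc
      rw [PySem.List.enumerate_cons]
      simp only [List.foldl_cons, stepB]
      by_cases hvm : v = m
      · subst hvm
        simp only [hc, Bool.false_eq_true, if_false]
        have hkeep : ∀ (e' : Int) (te' tod' : Option Int),
            ((PySem.List.enumerate t (i+1)).foldl stepB (e', d.insert v i, te', tod')).2.1.get? v
              = some i :=
          fun e' te' tod' => dictKeep v i _ _ (by rw [PySem.Dict.get?_insert_self])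
        by_cases hpar : PySem.Int.mod v 2 = 0
        · rw [if_pos hpar, PySem.Dict.getD_eq_get?_getD, hkeep, PySem.List.index?_cons_self]
          simp
        · rw [if_neg hpar, PySem.Dict.getD_eq_get?_getD, hkeep, PySem.List.index?_cons_self]
          simp
      · have hvt : v ∈ t := by
          rcases List.mem_cons.mp hv with rfl | h
          · exact absurd rfl hvm
          · exact h
        have hidx : PySem.List.index? (m :: t) v = (PySem.List.index? t v).map (· + 1) :=
          PySem.List.index?_cons_of_ne t (show m ≠ v from fun h => hvm h.symm)
        obtain ⟨k, hk⟩ := Option.isSome_iff_exists.mp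
          ((PySem.List.index?_isSome_iff t v).mpr hvt)
        have hc' : (if d.contains m then d else d.insert m i).contains v = false := by
          by_cases hdm : d.contains m = true
          · rw [if_pos hdm]; exact hc
          · rw [if_neg hdm, PySem.Dict.contains_insert]
            simp [hc, hvm]
        by_cases hpar : PySem.Int.mod m 2 = 0
        · rw [if_pos hpar, ih (i+1) (e+1) _ (some m) tod v hvt hc', hidx, hk]
          simp only [Option.map_some, Option.getD_some]
          push_cast; ring
        · rw [if_neg hpar, ih (i+1) e _ te (some m) v hvt hc', hidx, hk]
          simp only [Option.map_some, Option.getD_some]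
          push_cast; ring

-- ===== VERDICT (by name: the statement is the Claim_ definition above) =====
theorem f_spec : Claim_equal_f := by
  intro b _ hpre
  unfold Spec_f f f_alt
  simp only []
  rw [countA b 0, projB_even b 0 0 PySem.Dict.empty none none,
      projB_te b 0 0 PySem.Dict.empty none none, projB_to b 0 0 PySem.Dict.empty none none]
  simp only [zero_add]
  by_cases h1 : (b.countP (fun m => PySem.Int.mod m 2 == 0) : Int) = 1
  · have hcnt : 0 < b.countP (fun m => PySem.Int.mod m 2 == 0) := by omega
    have hex : ∃ m ∈ b, PySem.Int.mod m 2 = 0 := by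
      obtain ⟨m, hm, hp⟩ := List.countP_pos_iff.mp hcnt
      exact ⟨m, hm, by simpa using hp⟩
    obtain ⟨v, hv, hmem, hp⟩ := lastSpec (fun m => PySem.Int.mod m 2 = 0) b none hex
    have hA := lastMap (fun m => PySem.Int.mod m 2 = 0)
      (fun m => (((PySem.List.index? b m).getD 0 : Nat) : Int) + 1) b none
    simp only [Option.map_none] at hA
    rw [if_pos h1, if_pos h1, hA, hv]
    simp [projB_first b 0 0 PySem.Dict.empty none none v hmem (by simp)]
  · have hex : ∃ m ∈ b, PySem.Int.mod m 2 ≠ 0 := by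
      rcases hpre with hc | hex
      · exact absurd (show ((b.countP (fun m => PySem.Int.mod m 2 == 0) : Nat) : Int) = 1 by
          exact_mod_cast hc) h1
      · exact hex
    obtain ⟨v, hv, hmem, hp⟩ := lastSpec (fun m => PySem.Int.mod m 2 ≠ 0) b none hex
    have hA := lastMap (fun m => PySem.Int.mod m 2 ≠ 0)
      (fun m => (((PySem.List.index? b m).getD 0 : Nat) : Int) + 1) b none
    simp only [Option.map_none] at hA
    rw [if_neg h1, if_neg h1, hA, hv]
    simp [projB_first b 0 0 PySem.Dict.empty none none v hmem (by simp)]
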